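-- pv_equiv track=rewrite | github.com/Holllup/aeee-raspberry-pi-robot-car | week_06_07_competition_tasks/09_maze_navigation_bonus/code/maze_route_memory.py | spans_from_columns
-- ===== SOURCE A (Python) =====
-- def spans_from_columns(active_columns):
--     spans = []
--     start = None
--     for idx, active in enumerate(active_columns):
--         if active and start is None:
--             start = idx
--         elif not active and start is not None:
--             spans.append((start, idx - 1))
--             start = None
--     if start is not None:
--         spans.append((start, len(active_columns) - 1))
--     return spans
-- ===== SOURCE B (Python) =====
-- def spans_from_columns(active_columns):
--     cols = [bool(c) for c in active_columns]
--     prevs = [False] + cols[:-1]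
--     nexts = cols[1:] + [False]
--     starts = [i for i, (c, p) in enumerate(zip(cols, prevs)) if c and not p]
--     ends = [i for i, (c, nx) in enumerate(zip(cols, nexts)) if c and not nx]
--     return list(zip(starts, ends))
-- ===== Notes on version B (the rewrite author's own statement) =====
-- stated objective: alternative
-- what changed: Replaces the stateful start/None scan with edge detection: run starts (active with inactive predecessor) and run ends (active with inactive successor) are collected via zips with shifted copies of the list and paired up with zip.
import Mathlib
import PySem

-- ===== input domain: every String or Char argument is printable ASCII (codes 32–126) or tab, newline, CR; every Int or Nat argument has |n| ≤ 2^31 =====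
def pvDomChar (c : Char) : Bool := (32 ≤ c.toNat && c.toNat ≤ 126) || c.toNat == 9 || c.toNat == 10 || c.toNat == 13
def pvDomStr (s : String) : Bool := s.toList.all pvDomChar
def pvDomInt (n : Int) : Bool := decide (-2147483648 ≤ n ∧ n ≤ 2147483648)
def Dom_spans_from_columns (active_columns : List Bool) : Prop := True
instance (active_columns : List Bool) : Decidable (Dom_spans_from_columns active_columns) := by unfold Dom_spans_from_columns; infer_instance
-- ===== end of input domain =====

-- ===== PORT A =====
-- Port of A: stateful scan with an optional run start, folded over enumerate.
def spans_from_columns (active_columns : List Bool) : List (Int × Int) :=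
  let r := (PySem.List.enumerate active_columns).foldl
    (fun (s : List (Int × Int) × Option Int) (p : Int × Bool) =>
      if p.2 && s.2.isNone then (s.1, some p.1)
      else if !p.2 && s.2.isSome then (s.1 ++ [(s.2.getD 0, p.1 - 1)], none)
      else s) ([], none)
  match r.2 with
  | some s => r.1 ++ [(s, (active_columns.length : Int) - 1)]
  | none => r.1

-- ===== PORT B =====
-- B: edge detection — run starts (active, inactive predecessor) and run ends
-- (active, inactive successor) found via zips with shifted copies, then paired.
def spans_from_columns_alt (active_columns : List Bool) : List (Int × Int) :=
  let cols := active_columns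
  let prevs := false :: cols.dropLast
  let nexts := cols.drop 1 ++ [false]
  let starts := (PySem.List.enumerate (cols.zip prevs)).filterMap
    (fun p => if p.2.1 && !p.2.2 then some p.1 else none)
  let ends := (PySem.List.enumerate (cols.zip nexts)).filterMap
    (fun p => if p.2.1 && !p.2.2 then some p.1 else none)
  starts.zip ends

-- ===== PRECONDITION & SPEC =====
def Spec_spans_from_columns (active_columns : List Bool) (out : List (Int × Int)) : Prop := out = spans_from_columns_alt active_columns
instance (active_columns : List Bool) (out : List (Int × Int)) : Decidable (Spec_spans_from_columns active_columns out) := by unfold Spec_spans_from_columns; infer_instance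

-- ===== CLAIM (what is proved, stated in full; the proofs are below) =====
def Claim_equal_spans_from_columns : Prop := ∀ (active_columns : List Bool), Dom_spans_from_columns active_columns → Spec_spans_from_columns active_columns (spans_from_columns active_columns)

-- ===== LEMMAS AND PROOFS =====

-- Reference recursion for A's scan: idx is the absolute index of the list head,
-- st the pending run start.
def goA (idx : Int) (st : Option Int) : List Bool → List (Int × Int)
  | [] => match st with | some s => [(s, idx - 1)] | none => []
  | b :: t =>
    match st with
    | none => if b then goA (idx + 1) (some idx) t else goA (idx + 1) none t
    | some s => if b then goA (idx + 1) (some s) t else (s, idx - 1) :: goA (idx + 1) none t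

-- Start indices: current active, previous (carried as `prev`) inactive.
def startsP (idx : Int) (prev : Bool) : List Bool → List Int
  | [] => []
  | b :: t => (if b && !prev then [idx] else []) ++ startsP (idx + 1) b t

-- End indices, previous-element form: emit idx-1 when the carried `prev` is active
-- and the current element (or the end of the list) is inactive.
def endsP (idx : Int) (prev : Bool) : List Bool → List Int
  | [] => if prev then [idx - 1] else []
  | b :: t => (if prev && !b then [idx - 1] else []) ++ endsP (idx + 1) b t

-- End indices, lookahead form (matches B's zip with the successor list).
def endsQ (idx : Int) : List Bool → List Int
  | [] => []
  | b :: t => (if b && !(t.headD false) then [idx] else []) ++ endsQ (idx + 1) t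

theorem foldA (a : List Bool) : ∀ (k : Int) (spans : List (Int × Int)) (st : Option Int),
    (let r := (PySem.List.enumerate a k).foldl
      (fun (s : List (Int × Int) × Option Int) (p : Int × Bool) =>
        if p.2 && s.2.isNone then (s.1, some p.1)
        else if !p.2 && s.2.isSome then (s.1 ++ [(s.2.getD 0, p.1 - 1)], none)
        else s) (spans, st)
     match r.2 with
     | some s => r.1 ++ [(s, k + (a.length : Int) - 1)]
     | none => r.1)
    = spans ++ goA k st a := by
  induction a with
  | nil =>
    intro k spans st
    cases st <;> simp [PySem.List.enumerate_nil, goA]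
  | cons b t ih =>
    intro k spans st
    cases st with
    | none =>
      cases b with
      | true =>
        simpa [PySem.List.enumerate_cons, goA, add_assoc, add_comm, add_left_comm] using ih (k + 1) spans (some k)
      | false =>
        simpa [PySem.List.enumerate_cons, goA, add_assoc, add_comm, add_left_comm] using ih (k + 1) spans none
    | some s =>
      cases b with
      | true =>
        simpa [PySem.List.enumerate_cons, goA, add_assoc, add_comm, add_left_comm] using ih (k + 1) spans (some s)
      | false =>
        have h := ih (k + 1) (spans ++ [(s, k - 1)]) none
        simp [PySem.List.enumerate_cons, goA, add_comm, add_left_comm] at h ⊢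
        simp [h]

theorem A_eq_goA (a : List Bool) : spans_from_columns a = goA 0 none a := by
  have h := foldA a 0 [] none
  simpa [spans_from_columns] using h

theorem startsB (a : List Bool) : ∀ (k : Int) (prev : Bool),
    (PySem.List.enumerate (a.zip (prev :: a.dropLast)) k).filterMap
      (fun p => if p.2.1 && !p.2.2 then some p.1 else none) = startsP k prev a := by
  induction a with
  | nil => intro k prev; simp [PySem.List.enumerate_nil, startsP]
  | cons b t ih =>
    intro k prev
    cases t with
    | nil =>
      cases b <;> cases prev <;>
        simp [PySem.List.enumerate_cons, PySem.List.enumerate_nil, startsP]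
    | cons c t' =>
      have h := ih (k + 1) b
      rw [show (b :: c :: t').dropLast = b :: (c :: t').dropLast from rfl,
        List.zip_cons_cons, PySem.List.enumerate_cons, List.filterMap_cons, h]
      by_cases hb : b && !prev <;> simp [startsP, hb]

theorem endsB (a : List Bool) : ∀ (k : Int),
    (PySem.List.enumerate (a.zip (a.drop 1 ++ [false])) k).filterMap
      (fun p => if p.2.1 && !p.2.2 then some p.1 else none) = endsQ k a := by
  induction a with
  | nil => intro k; simp [PySem.List.enumerate_nil, endsQ]
  | cons b t ih =>
    intro k
    cases t with
    | nil =>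
      cases b <;>
        simp [PySem.List.enumerate_cons, PySem.List.enumerate_nil, endsQ]
    | cons c t' =>
      have h := ih (k + 1)
      rw [show List.drop 1 (c :: t') = t' from rfl] at h
      rw [show List.drop 1 (b :: c :: t') = c :: t' from rfl]
      simp only [List.cons_append, List.zip_cons_cons, PySem.List.enumerate_cons,
        List.filterMap_cons]
      rw [h]
      by_cases hb : b && !c <;> simp [endsQ, hb, List.headD]

theorem endsPQ (a : List Bool) : ∀ (k : Int) (prev : Bool),
    endsP k prev a = (if prev && !(a.headD false) then [k - 1] else []) ++ endsQ k a := by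
  induction a with
  | nil => intro k prev; cases prev <;> simp [endsP, endsQ]
  | cons b t ih =>
    intro k prev
    have h := ih (k + 1) b
    simp [endsP, endsQ, h, List.headD]

theorem goA_eq_zip (a : List Bool) : ∀ (k : Int) (st : Option Int),
    goA k st a =
      List.zip ((match st with | some s => [s] | none => []) ++ startsP k st.isSome a)
        (endsP k st.isSome a) := by
  induction a with
  | nil =>
    intro k st
    cases st <;> simp [goA, startsP, endsP]
  | cons b t ih =>
    intro k st
    cases st with
    | none =>
      cases b with
      | true => simpa [goA, startsP, endsP] using ih (k + 1) (some k)
      | false => simpa [goA, startsP, endsP] using ih (k + 1) none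
    | some s =>
      cases b with
      | true => simpa [goA, startsP, endsP] using ih (k + 1) (some s)
      | false =>
        have h := ih (k + 1) none
        simp [goA, startsP, endsP, h]

-- ===== VERDICT (by name: the statement is the Claim_ definition above) =====
theorem spans_from_columns_spec : Claim_equal_spans_from_columns := by
  intro a _
  unfold Spec_spans_from_columns
  have hA : spans_from_columns a = List.zip (startsP 0 false a) (endsP 0 false a) := by
    rw [A_eq_goA, goA_eq_zip]
    simp
  have hB : spans_from_columns_alt a = List.zip (startsP 0 false a) (endsQ 0 a) := by
    simp only [spans_from_columns_alt]
    rw [startsB a 0 false, endsB a 0]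
  rw [hA, hB, endsPQ]
  simp
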